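-- pv_equiv track=rewrite | github.com/sherhacky/aoc22 | day18.py | faces
-- ===== SOURCE A (Python) =====
-- def faces(cube):
--     x,y,z = cube
--     result = []
--     for shift in [0, 1]:
--         for coord in [0, 1, 2]:
--             ranges = [[0,1] if axis != coord else [shift] for axis in range(3)]
--             result.append(frozenset((x+i, y+j, z+k) for i in ranges[0] for j in ranges[1] for k in ranges[2]))
--     return(frozenset(result))
-- ===== SOURCE B (Python) =====
-- def faces(cube):
--     x, y, z = cube
--     vertices = [(x + dx, y + dy, z + dz) for dx in (0, 1) for dy in (0, 1) for dz in (0, 1)]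
--     result = []
--     for v in (0, 1):
--         for axis in range(3):
--             base = (x, y, z)[axis] + v
--             result.append(frozenset(p for p in vertices if p[axis] == base))
--     return frozenset(result)
-- ===== Notes on version B (the rewrite author's own statement) =====
-- stated objective: simpler
-- what changed: B builds the 8 cube vertices once with a single comprehension and obtains each of the 6 faces by filtering the vertex list on one fixed coordinate, instead of A's per-face construction of a 'ranges' list of per-axis index lists and a triple nested generator over it.
import Mathlib
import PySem

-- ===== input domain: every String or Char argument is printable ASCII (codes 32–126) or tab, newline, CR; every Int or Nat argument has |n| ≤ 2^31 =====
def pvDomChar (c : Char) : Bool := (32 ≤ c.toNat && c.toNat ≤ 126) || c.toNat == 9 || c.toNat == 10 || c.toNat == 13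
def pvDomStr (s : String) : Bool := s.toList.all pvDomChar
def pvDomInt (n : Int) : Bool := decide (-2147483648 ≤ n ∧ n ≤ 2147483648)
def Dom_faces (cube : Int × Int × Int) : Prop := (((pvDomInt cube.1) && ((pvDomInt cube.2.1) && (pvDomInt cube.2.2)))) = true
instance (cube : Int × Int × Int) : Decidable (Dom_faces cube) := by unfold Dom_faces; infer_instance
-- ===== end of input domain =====

-- B materialises the 8 cube vertices once and selects each face by filtering on one coordinate,
-- instead of generating each face from a per-axis ranges list: a simpler decomposition, same cost.


-- ===== PORT A =====
-- direct transliteration of A: shift/coord loops, 'ranges' list, triple generator, frozenset = PySem.Set.ofList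
def faces (cube : Int × Int × Int) : List (List (Int × Int × Int)) :=
  let x := cube.1
  let y := cube.2.1
  let z := cube.2.2
  let result : List (List (Int × Int × Int)) :=
    [0, 1].foldl (fun result shift =>
      [0, 1, 2].foldl (fun result coord =>
        let ranges : List (List Int) :=
          (List.range 3).map (fun axis => if axis ≠ coord then [0, 1] else [shift])
        result ++ [PySem.Set.ofList
          ((PySem.List.pyGetD ranges 0 []).flatMap (fun i =>
            (PySem.List.pyGetD ranges 1 []).flatMap (fun j =>
              (PySem.List.pyGetD ranges 2 []).map (fun k => (x + i, y + j, z + k)))))]) result) []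
  PySem.Set.ofList result

-- ===== PORT B =====
-- transliteration of B: materialise the 8 vertices, then per (v, axis) filter the vertices on that face;
-- the Python tuple indexings '(x,y,z)[axis]' and 'p[axis]' (axis ∈ range(3)) are ported as exact if-chains
def faces_alt (cube : Int × Int × Int) : List (List (Int × Int × Int)) :=
  let x := cube.1
  let y := cube.2.1
  let z := cube.2.2
  let vertices : List (Int × Int × Int) :=
    [0, 1].flatMap (fun dx => [0, 1].flatMap (fun dy =>
      [0, 1].map (fun dz => (x + dx, y + dy, z + dz))))
  let result : List (List (Int × Int × Int)) :=
    [0, 1].foldl (fun result v =>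
      (List.range 3).foldl (fun result axis =>
        let base := (if axis = 0 then x else if axis = 1 then y else z) + v
        result ++ [PySem.Set.ofList (vertices.filter (fun p =>
          (if axis = 0 then p.1 else if axis = 1 then p.2.1 else p.2.2) == base))]) result) []
  PySem.Set.ofList result

-- ===== PRECONDITION & SPEC =====
def Spec_faces (cube : Int × Int × Int) (out : List (List (Int × Int × Int))) : Prop := out = faces_alt cube
instance (cube : Int × Int × Int) (out : List (List (Int × Int × Int))) : Decidable (Spec_faces cube out) := by unfold Spec_faces; infer_instance

-- ===== CLAIM (what is proved, stated in full; the proofs are below) =====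
def Claim_equal_faces : Prop := ∀ (cube : Int × Int × Int), Dom_faces cube → Spec_faces cube (faces cube)

-- ===== LEMMAS AND PROOFS =====

-- ===== VERDICT (by name: the statement is the Claim_ definition above) =====
theorem faces_spec : Claim_equal_faces := by
  intro cube _
  obtain ⟨x, y, z⟩ := cube
  unfold Spec_faces faces faces_alt
  simp [PySem.Set.ofList, PySem.Set.add, PySem.List.pyGetD, PySem.List.pyGet?, PySem.List.pyIdx?,
        List.range_succ, Prod.ext_iff]
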